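-- pv_equiv track=rewrite | github.com/pypi-data/pypi-mirror-403 | packages/papervibe/papervibe-0.1.0a1-py3-none-any.whl/papervibe/process.py | extract_footnotes
-- ===== SOURCE A (Python) =====
-- from typing import Optional, List, Tuple, Callable
--
-- def extract_footnotes(text: str) -> Tuple[str, List[str]]:
--     """
--     Extract \\footnote{...} commands from text.
--
--     Args:
--         text: LaTeX text potentially containing footnotes
--
--     Returns:
--         Tuple of (text_without_footnotes, list_of_footnote_commands)
--     """
--     footnotes = []
--     result = []
--     i = 0
--
--     while i < len(text):
--         # Look for \footnote{
--         if text[i:i+10] == "\\footnote{":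
--             # Find the matching closing brace
--             start = i
--             i += 10
--             brace_level = 1
--
--             while i < len(text) and brace_level > 0:
--                 if text[i] == "{" and (i == 0 or text[i-1] != "\\"):
--                     brace_level += 1
--                 elif text[i] == "}" and (i == 0 or text[i-1] != "\\"):
--                     brace_level -= 1
--                 i += 1
--
--             # Extract the full footnote command
--             footnotes.append(text[start:i])
--         else:
--             result.append(text[i])
--             i += 1
--
--     return "".join(result), footnotes
-- ===== SOURCE B (Python) =====
-- def extract_footnotes(text):
--     """Extract \\footnote{...} commands from text (find-based scan)."""
--     pat = "\\footnote{"
--     footnotes = []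
--     parts = []
--     pos = 0
--     n = len(text)
--     while True:
--         idx = text.find(pat, pos)
--         if idx == -1:
--             parts.append(text[pos:])
--             break
--         parts.append(text[pos:idx])
--         i = idx + 10
--         brace_level = 1
--         while i < n and brace_level > 0:
--             if text[i] == "{" and text[i-1] != "\\":
--                 brace_level += 1
--             elif text[i] == "}" and text[i-1] != "\\":
--                 brace_level -= 1
--             i += 1
--         footnotes.append(text[idx:i])
--         pos = i
--     return "".join(parts), footnotes
-- ===== Notes on version B (the rewrite author's own statement) =====
-- stated objective: faster
-- what changed: The outer char-by-char while loop that copies one character per iteration is replaced by a str.find-driven scan that jumps directly from one '\footnote{' occurrence to the next and copies whole inter-footnote slices; the brace-matching inner loop is kept identical.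
import Mathlib
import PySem

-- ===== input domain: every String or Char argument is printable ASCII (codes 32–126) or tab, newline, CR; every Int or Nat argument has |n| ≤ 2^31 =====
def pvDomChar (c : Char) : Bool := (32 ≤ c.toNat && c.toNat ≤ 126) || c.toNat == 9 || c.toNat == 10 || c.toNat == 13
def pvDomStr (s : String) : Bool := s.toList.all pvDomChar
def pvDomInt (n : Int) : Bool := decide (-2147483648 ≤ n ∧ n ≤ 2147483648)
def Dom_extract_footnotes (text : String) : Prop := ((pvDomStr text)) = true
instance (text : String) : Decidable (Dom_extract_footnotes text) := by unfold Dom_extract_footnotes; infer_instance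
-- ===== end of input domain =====

-- B replaces A's char-by-char outer scan by a find-based scan that copies whole slices between
-- footnotes (objective: idiomatic/alternative decomposition); the brace-matching inner loop is the same.

-- ===== PORT A =====
-- the pattern "\footnote{" as a list of characters (shared literal constant)
def pvPat : List Char := "\\footnote{".toList

-- A's inner brace-matching loop: prev = text[i-1], lvl = brace_level; returns the consumed
-- characters and the remaining suffix.  (Python's 'i == 0 or' disjunct is unreachable: the
-- loop always starts at i ≥ 10, so only the prev-char escape test is ported.)
def innerA (prev : Char) (lvl : Nat) (cs : List Char) : List Char × List Char :=
  match cs with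
  | [] => ([], [])
  | c :: rest =>
    if lvl = 0 then ([], c :: rest)
    else
      let lvl' := if c = '{' ∧ prev ≠ '\\' then lvl + 1
                  else if c = '}' ∧ prev ≠ '\\' then lvl - 1
                  else lvl
      let p := innerA c lvl' rest
      (c :: p.1, p.2)

theorem innerA_len (prev : Char) (lvl : Nat) (cs : List Char) :
    (innerA prev lvl cs).2.length ≤ cs.length := by
  induction cs generalizing prev lvl with
  | nil => simp [innerA]
  | cons c rest ih =>
    simp only [innerA]
    split
    · simp
    · exact le_trans (ih _ _) (by simp)

-- A's outer while loop, one character at a time.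
def outerA (cs : List Char) : List Char × List (List Char) :=
  match cs with
  | [] => ([], [])
  | c :: rest =>
    if (c :: rest).take 10 = pvPat then
      let p := innerA '{' 1 ((c :: rest).drop 10)
      let q := outerA p.2
      (q.1, (pvPat ++ p.1) :: q.2)
    else
      let q := outerA rest
      (c :: q.1, q.2)
termination_by cs.length
decreasing_by
  · have h := innerA_len '{' 1 ((c :: rest).drop 10)
    simp at h ⊢; omega
  · simp

def extract_footnotes (text : String) : String × List String :=
  let q := outerA text.toList
  (String.ofList q.1, q.2.map String.ofList)

-- ===== PORT B =====
-- B's inner brace-matching loop (same logic as A's, reused verbatim by Source B's helper).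
def innerB (prev : Char) (lvl : Nat) (cs : List Char) : List Char × List Char :=
  match cs with
  | [] => ([], [])
  | c :: rest =>
    if lvl = 0 then ([], c :: rest)
    else
      let lvl' := if c = '{' ∧ prev ≠ '\\' then lvl + 1
                  else if c = '}' ∧ prev ≠ '\\' then lvl - 1
                  else lvl
      let p := innerB c lvl' rest
      (c :: p.1, p.2)

theorem innerB_len (prev : Char) (lvl : Nat) (cs : List Char) :
    (innerB prev lvl cs).2.length ≤ cs.length := by
  induction cs generalizing prev lvl with
  | nil => simp [innerB]
  | cons c rest ih =>
    simp only [innerB]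
    split
    · simp
    · exact le_trans (ih _ _) (by simp)

-- port of text.find(pvPat, pos): the characters before the first occurrence, and the suffix
-- starting at it (none if there is no occurrence)
def pyFindB (cs : List Char) : Option (List Char × List Char) :=
  match cs with
  | [] => none
  | c :: rest =>
    if (c :: rest).take 10 = pvPat then some ([], c :: rest)
    else
      match pyFindB rest with
      | none => none
      | some q => some (c :: q.1, q.2)

theorem pyFindB_spec (cs : List Char) (q : List Char × List Char)
    (h : pyFindB cs = some q) : q.1 ++ q.2 = cs ∧ q.2.take 10 = pvPat := by
  induction cs generalizing q with
  | nil => simp [pyFindB] at h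
  | cons c rest ih =>
    simp only [pyFindB] at h
    split at h
    · rename_i hp
      cases h; exact ⟨rfl, hp⟩
    · rename_i hp
      cases hfind : pyFindB rest with
      | none => rw [hfind] at h; cases h
      | some q' =>
        rw [hfind] at h
        cases h
        obtain ⟨h1, h2⟩ := ih q' hfind
        exact ⟨by simp [← h1], h2⟩

-- B's outer loop: jump from match to match, copying the slice in between in one piece.
def outerB (cs : List Char) : List Char × List (List Char) :=
  match hf : pyFindB cs with
  | none => (cs, [])
  | some q =>
    let p := innerB '{' 1 (q.2.drop 10)
    let r := outerB p.2
    (q.1 ++ r.1, (pvPat ++ p.1) :: r.2)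
termination_by cs.length
decreasing_by
  have hs := pyFindB_spec cs q hf
  have hl := innerB_len '{' 1 (q.2.drop 10)
  have h10 : q.2.length ≥ 10 := by
    have : (q.2.take 10).length = pvPat.length := by rw [hs.2]
    simp [pvPat] at this; omega
  have : q.1.length + q.2.length = cs.length := by
    rw [← hs.1]; simp
  simp at hl ⊢; omega

def extract_footnotes_alt (text : String) : String × List String :=
  let q := outerB text.toList
  (String.ofList q.1, q.2.map String.ofList)

-- ===== PRECONDITION & SPEC =====
def Spec_extract_footnotes (text : String) (out : String × List String) : Prop := out = extract_footnotes_alt text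
instance (text : String) (out : String × List String) : Decidable (Spec_extract_footnotes text out) := by unfold Spec_extract_footnotes; infer_instance

-- ===== CLAIM (what is proved, stated in full; the proofs are below) =====
def Claim_equal_extract_footnotes : Prop := ∀ (text : String), Dom_extract_footnotes text → Spec_extract_footnotes text (extract_footnotes text)

-- ===== LEMMAS AND PROOFS =====

theorem inner_eq (cs : List Char) (prev : Char) (lvl : Nat) :
    innerA prev lvl cs = innerB prev lvl cs := by
  induction cs generalizing prev lvl with
  | nil => rfl
  | cons c rest ih => simp only [innerA, innerB, ih]

theorem outerA_none (cs : List Char) (h : pyFindB cs = none) : outerA cs = (cs, []) := by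
  induction cs with
  | nil => simp [outerA]
  | cons c rest ih =>
    simp only [pyFindB] at h
    split at h
    · cases h
    · rename_i hp
      cases hfind : pyFindB rest with
      | none =>
        rw [outerA, if_neg hp, ih hfind]
      | some q' => rw [hfind] at h; cases h

theorem outerA_step (cs b s : List Char) (h : pyFindB cs = some (b, s)) :
    outerA cs = (b ++ (outerA s).1, (outerA s).2) := by
  induction cs generalizing b with
  | nil => simp [pyFindB] at h
  | cons c rest ih =>
    simp only [pyFindB] at h
    split at h
    · rename_i hp
      cases h; simp
    · rename_i hp
      cases hfind : pyFindB rest with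
      | none => rw [hfind] at h; cases h
      | some q' =>
        rw [hfind] at h
        cases h
        rw [outerA, if_neg hp, ih q'.1 hfind]
        simp

theorem outer_eq (cs : List Char) : outerA cs = outerB cs := by
  generalize hn : cs.length = n
  induction n using Nat.strong_induction_on generalizing cs with
  | _ n ih =>
    cases hf : pyFindB cs with
    | none => rw [outerA_none cs hf, outerB, hf]
    | some q =>
      obtain ⟨h1, h2⟩ := pyFindB_spec cs q hf
      have h10 : q.2.length ≥ 10 := by
        have : (q.2.take 10).length = pvPat.length := by rw [h2]
        simp [pvPat] at this; omega
      -- q.2 is nonempty, so outerA on it takes the match branch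
      obtain ⟨c, rest, hq2⟩ : ∃ c rest, q.2 = c :: rest := by
        cases hq : q.2 with
        | nil => rw [hq] at h10; simp at h10
        | cons c rest => exact ⟨c, rest, rfl⟩
      have hstepA : outerA cs = (q.1 ++ (outerA q.2).1, (outerA q.2).2) := by
        have := outerA_step cs q.1 q.2 (by rw [hf])
        exact this
      have hlt : (innerB '{' 1 (q.2.drop 10)).2.length < n := by
        have hl := innerB_len '{' 1 (q.2.drop 10)
        have hlen : q.1.length + q.2.length = cs.length := by rw [← h1]; simp
        simp at hl; omega
      have hA2 : outerA q.2 =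
          ((outerA (innerA '{' 1 (q.2.drop 10)).2).1,
            (pvPat ++ (innerA '{' 1 (q.2.drop 10)).1) :: (outerA (innerA '{' 1 (q.2.drop 10)).2).2) := by
        rw [hq2, outerA, if_pos (by rw [← hq2]; exact h2)]
      rw [hstepA, hA2, outerB, hf]
      simp only [inner_eq]
      rw [ih _ hlt _ rfl]

theorem extract_footnotes_spec : Claim_equal_extract_footnotes := by
  intro text _
  unfold Spec_extract_footnotes extract_footnotes extract_footnotes_alt
  rw [outer_eq]
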